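-- pv_equiv track=rewrite | github.com/gahjelle/everybody_codes | python/src/2024_the-kingdom-of-algorithmia/20_gliding-finale/ec202420.py | glide_to_ground
-- ===== SOURCE A (Python) =====
-- import collections
--
-- UPLIFT = {"S": -1, ".": -1, "-": -2, "+": 1, "A": -1, "B": -1, "C": -1}
--
-- def glide_to_ground(grid, start, height):
--     """Glide as far south as possible before hitting the ground.
--
--     1. Find optimal column to glide within
--     2. Navigate to optimal column
--     3. Glide until hitting the ground
--     """
--     num_rows = max(row for row, _ in grid) + 1
--     open_cols = [
--         col
--         for col, count in collections.Counter(col for _, col in grid).items()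
--         if count == num_rows
--     ]
--     column_uplift = {
--         col: sum(UPLIFT[grid[r, col]] for r in range(num_rows)) for col in open_cols
--     }
--     column, dheight = max(
--         column_uplift.items(), key=lambda item: (item[1], -abs(item[0] - start[1]))
--     )
--
--     height = navigate_to(grid, start, (num_rows - 1, column), height)
--     south = num_rows - 1
--
--     jumps = height // -dheight
--     south += jumps * num_rows
--     height += jumps * dheight
--
--     # TODO: account for left_over height
--     return south
--
-- def navigate_to(grid, start, end, height):
--     """Glide from start to end aiming for the heighest height."""
--     return height - (abs(end[0] - start[0]) + abs(end[1] - start[1]) - 3 * 2)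
-- ===== SOURCE B (Python) =====
-- UPLIFT = {"S": -1, ".": -1, "-": -2, "+": 1, "A": -1, "B": -1, "C": -1}
--
-- def glide_to_ground(grid, start, height):
--     """Glide as far south as possible before hitting the ground.
--
--     One aggregation pass over the grid collects, per column, how many cells it
--     has and its total uplift; a running argmax then picks the best full column.
--     """
--     num_rows = max(row for row, _ in grid) + 1
--     counts = {}
--     uplift = {}
--     for (_, col), tile in grid.items():
--         counts[col] = counts.get(col, 0) + 1
--         uplift[col] = uplift.get(col, 0) + UPLIFT.get(tile, 0)
--
--     best = None
--     for col, count in counts.items():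
--         if count == num_rows:
--             key = (uplift[col], -abs(col - start[1]))
--             if best is None or key > best[0]:
--                 best = (key, col)
--     (dheight, _), column = best
--
--     height -= abs((num_rows - 1) - start[0]) + abs(column - start[1]) - 6
--     south = num_rows - 1
--     return south + (height // -dheight) * num_rows
-- ===== Notes on version B (the rewrite author's own statement) =====
-- stated objective: alternative
-- what changed: B replaces A's Counter pass plus a per-column scan over range(num_rows) with grid dict lookups by a single aggregation pass that accumulates each column's cell count and total uplift, and replaces building the column_uplift dict plus max(...) by a running argmax over the full columns in the same first-appearance order.
import Mathlib
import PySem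

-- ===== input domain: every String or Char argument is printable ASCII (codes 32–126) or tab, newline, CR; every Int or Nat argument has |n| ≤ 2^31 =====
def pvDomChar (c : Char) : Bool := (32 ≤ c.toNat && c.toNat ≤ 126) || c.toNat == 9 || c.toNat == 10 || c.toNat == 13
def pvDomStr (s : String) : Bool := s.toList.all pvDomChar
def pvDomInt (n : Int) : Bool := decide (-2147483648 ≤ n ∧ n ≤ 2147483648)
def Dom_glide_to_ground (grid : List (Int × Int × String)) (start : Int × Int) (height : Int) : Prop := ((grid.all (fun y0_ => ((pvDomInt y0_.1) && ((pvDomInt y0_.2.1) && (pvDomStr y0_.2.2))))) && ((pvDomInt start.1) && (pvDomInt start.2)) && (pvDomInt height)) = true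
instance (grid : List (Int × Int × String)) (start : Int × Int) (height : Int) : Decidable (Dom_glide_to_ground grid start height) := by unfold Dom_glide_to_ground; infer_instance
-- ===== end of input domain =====

-- B replaces A's Counter pass plus per-column range-scan (with dict lookups) by a single
-- aggregation pass over the grid and a running argmax over the full columns (objective: alternative).

-- shared module constant UPLIFT and helpers (the grid dict built from the association list,
-- as the Python caller's dict(...) would; entries/rows/cols of that dict)
def pvUPLIFT : PySem.Dict String Int :=
  PySem.Dict.ofList [("S", -1), (".", -1), ("-", -2), ("+", 1), ("A", -1), ("B", -1), ("C", -1)]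

def pvGrid (grid : List (Int × Int × String)) : PySem.Dict (Int × Int) String :=
  PySem.Dict.ofList (grid.map (fun p => ((p.1, p.2.1), p.2.2)))

-- num_rows = max(row for row, _ in grid) + 1  (identical first line of A and B)
def pvNumRows (grid : List (Int × Int × String)) : Int :=
  (PySem.List.max? ((pvGrid grid).items.map (fun p => p.1.1)) (fun x => x)).getD 0 + 1

-- ===== PORT A =====
def navigate_to (grid : PySem.Dict (Int × Int) String) (start end_ : Int × Int) (height : Int) : Int :=
  height - (|end_.1 - start.1| + |end_.2 - start.2| - 3 * 2)

def glide_to_ground (grid : List (Int × Int × String)) (start : Int × Int) (height : Int) : Int :=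
  let g := pvGrid grid
  let num_rows := pvNumRows grid
  let open_cols : List Int :=
    ((PySem.Dict.counter (g.items.map (fun p => p.1.2))).items.filter
        (fun kv => kv.2 == num_rows)).map (fun kv => kv.1)
  let column_uplift : PySem.Dict Int Int :=
    open_cols.foldl
      (fun d c =>
        d.insert c (((PySem.List.pyRange 0 num_rows 1).map
          (fun r => pvUPLIFT.getD (g.getD (r, c) "") 0)).sum))
      PySem.Dict.empty
  -- max(column_uplift.items(), key=lambda item: (item[1], -abs(item[0] - start[1])));
  -- `none` is Python's ValueError on an empty dict, excluded by Pre_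
  match PySem.List.max2? column_uplift.items (fun it => it.2) (fun it => -|it.1 - start.2|) with
  | none => 0
  | some cd =>
    let column := cd.1
    let dheight := cd.2
    let height := navigate_to g start (num_rows - 1, column) height
    let south := num_rows - 1
    let jumps := PySem.Int.floordiv height (-dheight)
    -- (A's final `height += jumps * dheight` is dead code and dropped)
    south + jumps * num_rows

-- ===== PORT B =====
def glide_to_ground_alt (grid : List (Int × Int × String)) (start : Int × Int) (height : Int) : Int :=
  let g := pvGrid grid
  let num_rows := pvNumRows grid
  -- one pass: counts[col] += 1; uplift[col] += UPLIFT.get(tile, 0)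
  let cu :=
    g.items.foldl
      (fun (st : PySem.Dict Int Int × PySem.Dict Int Int) p =>
        (st.1.insert p.1.2 (st.1.getD p.1.2 0 + 1),
         st.2.insert p.1.2 (st.2.getD p.1.2 0 + pvUPLIFT.getD p.2 0)))
      (PySem.Dict.empty, PySem.Dict.empty)
  -- running argmax over the full columns, first winner kept
  let best :=
    cu.1.items.foldl
      (fun (best : Option ((Int × Int) × Int)) kv =>
        if kv.2 == num_rows then
          match best with
          | none => some ((cu.2.getD kv.1 0, -|kv.1 - start.2|), kv.1)
          | some b =>
            if cu.2.getD kv.1 0 > b.1.1 ∨ (cu.2.getD kv.1 0 = b.1.1 ∧ -|kv.1 - start.2| > b.1.2)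
            then some ((cu.2.getD kv.1 0, -|kv.1 - start.2|), kv.1)
            else best
        else best)
      none
  match best with
  | none => 0  -- Python's unpacking of None raises; excluded by Pre_
  | some kc =>
    let dheight := kc.1.1
    let column := kc.2
    let h := height - (|num_rows - 1 - start.1| + |column - start.2| - 6)
    num_rows - 1 + PySem.Int.floordiv h (-dheight) * num_rows

-- ===== PRECONDITION & SPEC =====
-- helpers for Pre_: a column is "full" (appears in every row-count), and its total uplift
def pvFull (grid : List (Int × Int × String)) (c : Int) : Bool :=
  ((((pvGrid grid).items.map (fun p => p.1.2)).count c : Int) == pvNumRows grid)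

def pvColSum (grid : List (Int × Int × String)) (c : Int) : Int :=
  (((pvGrid grid).items.filter (fun p => p.1.2 == c)).map (fun p => pvUPLIFT.getD p.2 0)).sum

-- Pre_ = exactly the inputs where Python A returns: a nonempty grid, at least one full column
-- (else max() gets an empty sequence), every full column present at all rows 0..num_rows-1 with
-- a tile from UPLIFT (else KeyError), and the best full column's uplift nonzero (else
-- ZeroDivisionError in height // -dheight).
def Pre_glide_to_ground (grid : List (Int × Int × String)) (start : Int × Int) (height : Int) : Prop :=
  grid ≠ [] ∧
  (∃ p ∈ (pvGrid grid).items, pvFull grid p.1.2 = true) ∧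
  (∀ p ∈ (pvGrid grid).items, pvFull grid p.1.2 = true →
      (p.2 ∈ (["S", ".", "-", "+", "A", "B", "C"] : List String) ∧
       ∀ r ∈ PySem.List.pyRange 0 (pvNumRows grid) 1,
         (r, p.1.2) ∈ (pvGrid grid).items.map (fun q => q.1))) ∧
  ((∃ p ∈ (pvGrid grid).items, pvFull grid p.1.2 = true ∧ 0 < pvColSum grid p.1.2) ∨
   (∀ p ∈ (pvGrid grid).items, pvFull grid p.1.2 = true → pvColSum grid p.1.2 < 0))

instance (grid : List (Int × Int × String)) (start : Int × Int) (height : Int) : Decidable (Pre_glide_to_ground grid start height) := by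
  unfold Pre_glide_to_ground; infer_instance

def pvWitness_glide_to_ground : (List (Int × Int × String)) × (Int × Int) × Int :=
  ([(0, 0, "+"), (1, 0, "+")], (0, 0), 5)

def Spec_glide_to_ground (grid : List (Int × Int × String)) (start : Int × Int) (height : Int) (out : Int) : Prop := out = glide_to_ground_alt grid start height
instance (grid : List (Int × Int × String)) (start : Int × Int) (height : Int) (out : Int) : Decidable (Spec_glide_to_ground grid start height out) := by unfold Spec_glide_to_ground; infer_instance

-- ===== CLAIM (what is proved, stated in full; the proofs are below) =====
def Claim_equal_glide_to_ground : Prop := ∀ (grid : List (Int × Int × String)) (start : Int × Int) (height : Int), Dom_glide_to_ground grid start height → Pre_glide_to_ground grid start height → Spec_glide_to_ground grid start height (glide_to_ground grid start height)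

-- ===== LEMMAS AND PROOFS =====

lemma pv_getD_uplift (l : List ((Int × Int) × String)) : ∀ (d : PySem.Dict Int Int) (c : Int),
    (l.foldl (fun d p => d.insert p.1.2 (d.getD p.1.2 0 + pvUPLIFT.getD p.2 0)) d).getD c 0
    = d.getD c 0 + ((l.filter (fun p => p.1.2 == c)).map (fun p => pvUPLIFT.getD p.2 0)).sum := by
  induction l with
  | nil => simp
  | cons p t ih =>
    intro d c
    simp only [List.foldl_cons, List.filter_cons]
    by_cases h : p.1.2 = c
    · simp [h, ih]; ring
    · simp [Ne.symm h, h, ih, PySem.Dict.getD_insert]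

lemma pv_colsum_eq (g : PySem.Dict (Int × Int) String) (nr : Int) (c : Int)
    (hnd : g.keys.Nodup)
    (hcount : ((g.items.map (fun p => p.1.2)).count c : Int) = nr)
    (hcov : ∀ r ∈ PySem.List.pyRange 0 nr 1, (r, c) ∈ g.items.map (fun q => q.1)) :
    ((PySem.List.pyRange 0 nr 1).map (fun r => pvUPLIFT.getD (g.getD (r, c) "") 0)).sum
    = ((g.items.filter (fun p => p.1.2 == c)).map (fun p => pvUPLIFT.getD p.2 0)).sum := by
  have hnd' : (g.items.map (fun q : (Int × Int) × String => q.1)).Nodup := by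
    simpa [PySem.Dict.keys] using hnd
  set E := g.items.filter (fun p => p.1.2 == c) with hE
  have hsubl : E.Sublist g.items := List.filter_sublist
  have hndE : (E.map (fun p => p.1)).Nodup := (hsubl.map _).nodup hnd'
  set T := (PySem.List.pyRange 0 nr 1).map (fun r => ((r, c) : Int × Int)) with hT
  have hTsub : T ⊆ E.map (fun p => p.1) := by
    intro k hk
    rw [hT] at hk
    obtain ⟨r, hr, rfl⟩ := List.mem_map.mp hk
    obtain ⟨p, hp, hpk⟩ := List.mem_map.mp (hcov r hr)
    refine List.mem_map.mpr ⟨p, List.mem_filter.mpr ⟨hp, ?_⟩, hpk⟩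
    have h2 : p.1.2 = c := by rw [hpk]
    simp [h2]
  have hTnd : T.Nodup := by
    refine (PySem.List.nodup_pyRange_one 0 nr).map ?_
    intro a b hab
    simpa using congrArg Prod.fst hab
  have hlenE : E.length = nr.toNat := by
    have h1 : E.length = (g.items.map (fun p => p.1.2)).count c := by
      rw [List.count_eq_countP, List.countP_map, hE, List.countP_eq_length_filter]
      rfl
    omega
  have hlenT : T.length = nr.toNat := by
    simp [hT, PySem.List.length_pyRange_one]
  have hperm : T.Perm (E.map (fun p => p.1)) :=
    (List.subperm_of_subset hTnd hTsub).perm_of_length_le (by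
      rw [List.length_map, hlenE, hlenT])
  have hval : E.map (fun p => pvUPLIFT.getD p.2 0)
      = (E.map (fun p => p.1)).map (fun k => pvUPLIFT.getD (g.getD k "") 0) := by
    rw [List.map_map]
    refine List.map_congr_left ?_
    intro p hp
    have hpg : ((p.1, p.2) : (Int × Int) × String) ∈ g.items := by
      simpa using hsubl.subset hp
    simp [PySem.Dict.getD_of_mem_items g hpg hnd ""]
  rw [hval, ← (hperm.map (fun k => pvUPLIFT.getD (g.getD k "") 0)).sum_eq, hT, List.map_map]
  rfl

lemma pv_selFold (S S' T : Int → Int) (l : List Int) (hS : ∀ c ∈ l, S' c = S c) :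
    ∀ (acc : Option (Int × Int)),
    l.foldl (fun (best : Option ((Int × Int) × Int)) c =>
        match best with
        | none => some ((S' c, T c), c)
        | some b =>
          if S' c > b.1.1 ∨ (S' c = b.1.1 ∧ T c > b.1.2)
          then some ((S' c, T c), c)
          else best)
      (acc.map (fun m => ((m.2, T m.1), m.1)))
    = (l.foldl (fun (acc : Option (Int × Int)) c =>
        match acc with
        | none => some (c, S c)
        | some m =>
          if (decide (m.2 < S c) || !decide (S c < m.2) && decide (T m.1 < T c)) = true
          then some (c, S c) else some m) acc).map (fun m => ((m.2, T m.1), m.1)) := by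
  induction l with
  | nil => intro acc; rfl
  | cons c t ih =>
    intro acc
    simp only [List.foldl_cons]
    rw [← ih (fun x hx => hS x (List.mem_cons_of_mem c hx))]
    have hSc := hS c (List.mem_cons_self ..)
    congr 1
    cases acc with
    | none => simp [hSc]
    | some m =>
      simp only [Option.map_some]
      by_cases h1 : m.2 < S c
      · simp [hSc, h1]
      · by_cases h2 : S c = m.2
        · by_cases h3 : T m.1 < T c
          · simp [hSc, h2, h3]
          · simp [hSc, h2, h3]
        · have hlt : S c < m.2 := lt_of_le_of_ne (not_lt.mp h1) h2
          simp [hSc, h1, h2, hlt]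

lemma pv_selFold_none (S S' T : Int → Int) (l : List Int) (hS : ∀ c ∈ l, S' c = S c) :
    l.foldl (fun (best : Option ((Int × Int) × Int)) c =>
        match best with
        | none => some ((S' c, T c), c)
        | some b =>
          if S' c > b.1.1 ∨ (S' c = b.1.1 ∧ T c > b.1.2)
          then some ((S' c, T c), c)
          else best) none
    = (PySem.List.max2? (l.map (fun c => (c, S c))) (fun it => it.2) (fun it => T it.1)).map
        (fun m => ((m.2, T m.1), m.1)) := by
  have h := pv_selFold S S' T l hS none
  rw [Option.map_none] at h
  simp only [PySem.List.max2?, List.foldl_map]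
  rw [h]
  refine congrArg _ (PySem.List.foldl_congr_mem l _ _ none ?_)
  intro acc c hc
  cases acc <;> rfl

lemma pv_equiv
 (grid : List (Int × Int × String)) (start : Int × Int) (height : Int)
    (hpre : Pre_glide_to_ground grid start height) :
    glide_to_ground grid start height = glide_to_ground_alt grid start height := by
  obtain ⟨hne, hex, hcov, hnz⟩ := hpre
  simp only [glide_to_ground, glide_to_ground_alt]
  set g := pvGrid grid with hg
  set nr := pvNumRows grid with hnr
  set cols := g.items.map (fun p => p.1.2) with hcols
  -- A's open_cols is the full columns in first-appearance order
  have hopen : ((PySem.Dict.counter cols).items.filter (fun kv => kv.2 == nr)).map (fun kv => kv.1)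
      = (PySem.Set.ofList cols).filter (fun c => ((cols.count c : Int) == nr)) := by
    rw [PySem.Dict.items_counter, List.filter_map, List.map_map]
    simp [Function.comp_def]
  rw [hopen]
  set fullCols := (PySem.Set.ofList cols).filter (fun c => ((cols.count c : Int) == nr)) with hfc
  have hndfc : (fullCols.map (fun c => c)).Nodup := by
    simpa using (PySem.Set.nodup_ofList cols).filter _
  have hfresh : ∀ c ∈ fullCols, (PySem.Dict.empty : PySem.Dict Int Int).contains c = false := by
    intro c _; exact PySem.Dict.contains_empty c
  have hitems := PySem.Dict.items_foldl_insert_fresh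
      (l := fullCols) (k := fun c => c)
      (v := fun c => ((PySem.List.pyRange 0 nr 1).map (fun r => pvUPLIFT.getD (g.getD (r, c) "") 0)).sum)
      (d := PySem.Dict.empty) hfresh hndfc
  have hempty : (PySem.Dict.empty : PySem.Dict Int Int).items = [] := rfl
  rw [hitems, hempty, List.nil_append]
  -- B side: split the paired fold into the counts dict and the uplift dict
  rw [PySem.List.foldl_prod_mk
      (f := fun (d : PySem.Dict Int Int) (p : (Int × Int) × String) => d.insert p.1.2 (d.getD p.1.2 0 + 1))
      (g := fun (d : PySem.Dict Int Int) (p : (Int × Int) × String) => d.insert p.1.2 (d.getD p.1.2 0 + pvUPLIFT.getD p.2 0))]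
  simp only []
  -- the counts dict is Counter(col for _, col in grid)
  have hcounts : g.items.foldl
      (fun (d : PySem.Dict Int Int) (p : (Int × Int) × String) => d.insert p.1.2 (d.getD p.1.2 0 + 1))
      PySem.Dict.empty = PySem.Dict.counter cols := by
    rw [← PySem.Dict.foldl_insert_getD_add_one_eq_counter, hcols, List.foldl_map]
  rw [hcounts, PySem.Dict.items_counter, List.foldl_map]
  simp only []
  rw [PySem.List.foldl_if_eq_foldl_filter, ← hfc]
  have hndg : g.keys.Nodup := by rw [hg]; unfold pvGrid; exact PySem.Dict.nodup_keys_ofList _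
  have hU : ∀ c ∈ fullCols, (List.foldl
        (fun (d : PySem.Dict Int Int) (p : (Int × Int) × String) =>
          d.insert p.1.2 (d.getD p.1.2 0 + pvUPLIFT.getD p.2 0)) PySem.Dict.empty g.items).getD c 0
      = ((PySem.List.pyRange 0 nr 1).map (fun r => pvUPLIFT.getD (g.getD (r, c) "") 0)).sum := by
    intro c hc
    have hmf := List.mem_filter.mp hc
    have hcm : c ∈ cols := (PySem.Set.mem_ofList cols c).mp hmf.1
    have hcnt : ((cols.count c : Int)) = nr := by simpa using hmf.2
    rw [pv_getD_uplift, PySem.Dict.getD_empty, zero_add]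
    obtain ⟨p, hp, rfl⟩ := List.mem_map.mp hcm
    have hfull : pvFull grid p.1.2 = true := by
      simp only [pvFull, ← hg, ← hnr, ← hcols]
      simpa using hcnt
    exact (pv_colsum_eq g nr p.1.2 hndg hcnt ((hcov p hp hfull).2)).symm
  rw [pv_selFold_none
      (fun c => ((PySem.List.pyRange 0 nr 1).map (fun r => pvUPLIFT.getD (g.getD (r, c) "") 0)).sum)
      _ (fun c => -|c - start.2|) fullCols hU]
  rcases hmax : PySem.List.max2?
      (fullCols.map (fun c =>
        (c, ((PySem.List.pyRange 0 nr 1).map (fun r => pvUPLIFT.getD (g.getD (r, c) "") 0)).sum)))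
      (fun it => it.2) (fun it => -|it.1 - start.2|) with _ | cd
  · rfl
  · norm_num [navigate_to]

-- ===== VERDICT (by name: the statement is the Claim_ definition above) =====
theorem glide_to_ground_spec : Claim_equal_glide_to_ground := by
  intro grid start height _hdom hpre
  show glide_to_ground grid start height = glide_to_ground_alt grid start height
  exact pv_equiv grid start height hpre
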